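-- pv_equiv track=rewrite | github.com/Khudyakov1/func_tester | run_tests.py | leave_numbers
-- ===== SOURCE A (Python) =====
-- def leave_numbers(string):
--     numbers = ['0','1','2','3','4','5','6','7','8','9','-',' ']
--     result = ''
--     for k in string:
--         if k in numbers or k == '.':
--             result += k
--     while result.find('  ') != -1:
--         result = result.replace('  ',' ')
--     result = result.strip()
--     return result
-- ===== SOURCE B (Python) =====
-- def leave_numbers(string):
--     allowed = '0123456789-.'
--     tokens = []
--     cur = []
--     for k in string:
--         if k in allowed:
--             cur.append(k)
--         elif k == ' ':
--             if cur:
--                 tokens.append(''.join(cur))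
--                 cur = []
--     if cur:
--         tokens.append(''.join(cur))
--     return ' '.join(tokens)
-- ===== Notes on version B (the rewrite author's own statement) =====
-- stated objective: faster
-- what changed: A filters characters and then repeatedly rescans and rewrites the whole string with a find/replace loop that halves double-space runs, finishing with a strip; B makes a single tokenizing pass that accumulates the kept-character tokens and joins them with single spaces, so the repeated-rescan collapse loop and the final strip disappear.
import Mathlib
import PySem

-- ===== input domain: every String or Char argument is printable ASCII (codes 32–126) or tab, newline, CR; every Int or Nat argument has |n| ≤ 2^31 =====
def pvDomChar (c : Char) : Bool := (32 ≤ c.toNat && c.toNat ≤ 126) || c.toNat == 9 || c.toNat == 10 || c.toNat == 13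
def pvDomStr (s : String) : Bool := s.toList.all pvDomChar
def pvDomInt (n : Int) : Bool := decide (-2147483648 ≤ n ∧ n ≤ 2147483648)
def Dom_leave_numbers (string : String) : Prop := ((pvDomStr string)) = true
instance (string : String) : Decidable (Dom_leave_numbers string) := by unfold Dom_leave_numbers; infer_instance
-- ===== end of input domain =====

-- B replaces A's filter + repeated whole-string double-space replace loop + strip with a single
-- tokenizing pass that accumulates tokens and joins them with single spaces (objective: faster, measured).

-- ===== PORT A =====
-- termination helpers for the 'while result.find("  ") != -1' loop: one replace pass
-- strictly shortens the string when '  ' occurs in it.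
def pvRep1 : List Char → List Char
  | [] => []
  | [a] => [a]
  | a :: b :: t => if a = ' ' ∧ b = ' ' then ' ' :: pvRep1 t else a :: pvRep1 (b :: t)

theorem pvGo_nil (f : Nat) (acc : List Char) :
    PySem.Chars.replace.go [' ', ' '] [' '] f [] acc = acc.reverse := by
  cases f <;> rw [PySem.Chars.replace.go] <;> simp

theorem pvReplaceGo_eq_rep1 (fuel : Nat) (l acc : List Char) (h : l.length ≤ fuel) :
    PySem.Chars.replace.go [' ', ' '] [' '] fuel l acc = acc.reverse ++ pvRep1 l := by
  induction fuel generalizing l acc with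
  | zero =>
    have hl : l = [] := by
      have := Nat.le_zero.mp h
      exact List.length_eq_zero_iff.mp this
    subst hl
    rw [pvGo_nil]; simp [pvRep1]
  | succ f ih =>
    match l with
    | [] => rw [pvGo_nil]; simp [pvRep1]
    | [c] =>
      rw [PySem.Chars.replace.go]
      have hp : [' ', ' '].isPrefixOf [c] = false := by simp [List.isPrefixOf]
      simp only [hp, Bool.false_eq_true, if_false]
      rw [pvGo_nil]
      simp [pvRep1]
    | a :: b :: t =>
      rw [PySem.Chars.replace.go]
      by_cases hab : a = ' ' ∧ b = ' '
      · obtain ⟨rfl, rfl⟩ := hab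
        have hp : [' ', ' '].isPrefixOf (' ' :: ' ' :: t) = true := by simp [List.isPrefixOf]
        simp only [hp, if_true]
        have ht : t.length ≤ f := by simp at h; omega
        rw [show (' ' :: ' ' :: t).drop [' ',' '].length = t by simp]
        rw [ih t ([' '].reverse ++ acc) ht]
        simp [pvRep1]
      · have hp : [' ', ' '].isPrefixOf (a :: b :: t) = false := by
          simp [List.isPrefixOf]
          intro ha hb; exact hab ⟨ha.symm, hb.symm⟩
        simp only [hp, Bool.false_eq_true, if_false]
        have ht : (b :: t).length ≤ f := by simp at h ⊢; omega
        rw [ih (b :: t) (a :: acc) ht]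
        simp [pvRep1, hab]

theorem pvReplace_eq_rep1 (l : List Char) :
    PySem.Chars.replace l [' ', ' '] [' '] = pvRep1 l := by
  rw [PySem.Chars.replace]
  simp only [List.isEmpty_cons, Bool.false_eq_true, if_false]
  exact pvReplaceGo_eq_rep1 l.length l [] le_rfl

theorem pvRep1_length_le (l : List Char) : (pvRep1 l).length ≤ l.length := by
  induction l using pvRep1.induct with
  | case1 => simp [pvRep1]
  | case2 a => simp [pvRep1]
  | case3 a b t hab ih => simp [pvRep1, hab]; omega
  | case4 a b t hab ih => simp [pvRep1, hab] at ih ⊢; omega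

theorem pvRep1_length_lt (l : List Char) (h : [' ', ' '] <:+: l) :
    (pvRep1 l).length < l.length := by
  induction l using pvRep1.induct with
  | case1 => simp at h
  | case2 a =>
    exfalso
    have := h.length_le
    simp at this
  | case3 a b t hab ih =>
    obtain ⟨rfl, rfl⟩ := hab
    have := pvRep1_length_le t
    simp [pvRep1]
    omega
  | case4 a b t hab ih =>
    rw [List.infix_cons_iff] at h
    rcases h with h | h
    · exfalso
      rw [List.cons_prefix_cons] at h
      obtain ⟨h1, h2⟩ := h
      rw [List.cons_prefix_cons] at h2
      exact hab ⟨h1.symm, h2.1.symm⟩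
    · have := ih h
      simp [pvRep1, hab] at this ⊢
      omega

def pvCollapse (result : List Char) : List Char :=
  if PySem.Chars.find result [' ', ' '] ≠ -1 then
    pvCollapse (PySem.Chars.replace result [' ', ' '] [' '])
  else result
termination_by result.length
decreasing_by
  rw [pvReplace_eq_rep1]
  exact pvRep1_length_lt result ((PySem.Chars.find_ne_neg_one_iff _ _).mp (by assumption))

def pvNumbers : List Char := ['0','1','2','3','4','5','6','7','8','9','-',' ']

def leave_numbers (string : String) : String :=
  let result : List Char :=
    string.toList.foldl (fun result k => if pvNumbers.contains k || k == '.' then result ++ [k] else result) []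
  let result := pvCollapse result
  let result := PySem.Chars.strip result
  String.mk result

-- ===== PORT B =====
def pvAllowed : List Char := ['0','1','2','3','4','5','6','7','8','9','-','.']

def pvTokB : List Char → List Char → List (List Char) → List (List Char)
  | [], cur, tokens => if cur.isEmpty then tokens else tokens ++ [cur]
  | k :: rest, cur, tokens =>
    if pvAllowed.contains k then pvTokB rest (cur ++ [k]) tokens
    else if k == ' ' then
      if cur.isEmpty then pvTokB rest [] tokens else pvTokB rest [] (tokens ++ [cur])
    else pvTokB rest cur tokens

def leave_numbers_alt (string : String) : String :=
  String.mk (PySem.Chars.join [' '] (pvTokB string.toList [] []))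

-- ===== PRECONDITION & SPEC =====
def Spec_leave_numbers (string : String) (out : String) : Prop := out = leave_numbers_alt string
instance (string : String) (out : String) : Decidable (Spec_leave_numbers string out) := by unfold Spec_leave_numbers; infer_instance

-- ===== CLAIM (what is proved, stated in full; the proofs are below) =====
def Claim_equal_leave_numbers : Prop := ∀ (string : String), Dom_leave_numbers string → Spec_leave_numbers string (leave_numbers string)

-- ===== LEMMAS AND PROOFS =====

-- the character filter of A as a Bool predicate
def pvPA (c : Char) : Bool := pvNumbers.contains c || c == '.'

-- canonical single-pass space-run collapser (the fixpoint A's while loop reaches)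
def pvCf : List Char → List Char
  | [] => []
  | [a] => [a]
  | a :: b :: t => if a = ' ' ∧ b = ' ' then pvCf (b :: t) else a :: pvCf (b :: t)

-- accumulator-free version of pvTokB
def pvToks : List Char → List Char → List (List Char)
  | [], cur => if cur.isEmpty then [] else [cur]
  | k :: rest, cur =>
    if pvAllowed.contains k then pvToks rest (cur ++ [k])
    else if k == ' ' then
      if cur.isEmpty then pvToks rest [] else cur :: pvToks rest []
    else pvToks rest cur

theorem pvTokB_toks (l : List Char) : ∀ cur tokens,
    pvTokB l cur tokens = tokens ++ pvToks l cur := by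
  induction l with
  | nil => intro cur tokens; by_cases h : cur.isEmpty <;> simp [pvTokB, pvToks, h]
  | cons k rest ih =>
    intro cur tokens
    by_cases h1 : k ∈ pvAllowed
    · simp [pvTokB, pvToks, h1, ih]
    · by_cases h2 : k = ' '
      · have hsp : ' ' ∉ pvAllowed := by decide
        subst h2
        by_cases h3 : cur = [] <;> simp [pvTokB, pvToks, hsp, h3, ih]
      · simp [pvTokB, pvToks, h1, h2, ih]

theorem pvAllowed_pA {c : Char} (h : pvAllowed.contains c = true) : pvPA c = true := by
  have hm : c ∈ pvAllowed := by simpa using h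
  fin_cases hm <;> decide

theorem pvPA_char {c : Char} (h : pvPA c = true) :
    c = ' ' ∨ (PySem.Chars.isspace c = false ∧ pvAllowed.contains c = true) := by
  have hm : c ∈ pvNumbers ∨ c = '.' := by
    simp [pvPA] at h
    rcases h with h | h
    · exact Or.inl (by simpa using h)
    · exact Or.inr h
  rcases hm with hm | rfl
  · fin_cases hm <;> first | exact Or.inl rfl | exact Or.inr (by decide)
  · exact Or.inr (by decide)

-- pvToks ignores characters rejected by A's filter
theorem pvToks_filter (l : List Char) : ∀ cur, pvToks (l.filter pvPA) cur = pvToks l cur := by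
  induction l with
  | nil => intro cur; simp
  | cons c rest ih =>
    intro cur
    by_cases hc : pvPA c
    · simp only [List.filter_cons, hc, if_true]
      by_cases h1 : c ∈ pvAllowed
      · simp [pvToks, h1, ih]
      · by_cases h2 : c = ' '
        · have hsp : ' ' ∉ pvAllowed := by decide
          subst h2
          by_cases h3 : cur = [] <;> simp [pvToks, hsp, h3, ih]
        · simp [pvToks, h1, h2, ih]
    · have h1 : c ∉ pvAllowed := by
        intro hx
        exact hc (pvAllowed_pA (by simpa using hx))
      have h2 : c ≠ ' ' := by
        rintro rfl
        exact hc (by decide)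
      simp only [List.filter_cons, hc]
      simp [pvToks, h1, h2, ih]

theorem pvGood_filter (l : List Char) : ∀ c ∈ l.filter pvPA, pvPA c = true := by
  intro c hc
  exact (List.mem_filter.mp hc).2

-- collapse loop = pvCf ------------------------------------------------------

theorem pvCf_rep1_cons (t : List Char) : ∀ a, pvCf (a :: pvRep1 t) = pvCf (a :: t) := by
  induction t using pvRep1.induct with
  | case1 => intro a; simp [pvRep1]
  | case2 b => intro a; simp [pvRep1]
  | case3 b c u hbc ih =>
    obtain ⟨rfl, rfl⟩ := hbc
    intro a
    by_cases ha : a = ' '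
    · subst ha
      show pvCf (' ' :: ' ' :: pvRep1 u) = pvCf (' ' :: ' ' :: ' ' :: u)
      rw [show pvCf (' ' :: ' ' :: pvRep1 u) = pvCf (' ' :: pvRep1 u) by simp [pvCf]]
      rw [ih ' ']
      simp [pvCf]
    · show pvCf (a :: ' ' :: pvRep1 u) = pvCf (a :: ' ' :: ' ' :: u)
      rw [show pvCf (a :: ' ' :: pvRep1 u) = a :: pvCf (' ' :: pvRep1 u) by simp [pvCf, ha]]
      rw [ih ' ']
      simp [pvCf, ha]
  | case4 b c u hbc ih =>
    intro a
    rw [show pvRep1 (b :: c :: u) = b :: pvRep1 (c :: u) by simp [pvRep1, hbc]]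
    by_cases hab : a = ' ' ∧ b = ' '
    · rw [show pvCf (a :: b :: pvRep1 (c :: u)) = pvCf (b :: pvRep1 (c :: u)) by simp [pvCf, hab]]
      rw [ih b]
      simp [pvCf, hab]
    · rw [show pvCf (a :: b :: pvRep1 (c :: u)) = a :: pvCf (b :: pvRep1 (c :: u)) by simp [pvCf, hab]]
      rw [ih b]
      simp [pvCf, hab]

theorem pvCf_rep1 (l : List Char) : pvCf (pvRep1 l) = pvCf l := by
  match l with
  | [] => rfl
  | [a] => rfl
  | a :: b :: t =>
    by_cases hab : a = ' ' ∧ b = ' '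
    · obtain ⟨rfl, rfl⟩ := hab
      rw [show pvRep1 (' ' :: ' ' :: t) = ' ' :: pvRep1 t by simp [pvRep1]]
      rw [pvCf_rep1_cons t ' ']
      simp [pvCf]
    · rw [show pvRep1 (a :: b :: t) = a :: pvRep1 (b :: t) by simp [pvRep1, hab]]
      rw [pvCf_rep1_cons (b :: t) a]

theorem pvCf_no_dd (l : List Char) (h : ¬ ([' ',' '] <:+: l)) : pvCf l = l := by
  induction l using pvCf.induct with
  | case1 => rfl
  | case2 a => rfl
  | case3 a b t hab ih =>
    exfalso
    obtain ⟨rfl, rfl⟩ := hab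
    exact h ⟨[], t, rfl⟩
  | case4 a b t hab ih =>
    have hbt : ¬ ([' ',' '] <:+: b :: t) := fun hx => h (List.infix_cons hx)
    simp [pvCf, hab, ih hbt]

theorem pvCollapse_eq_cf_aux : ∀ (n : Nat) (l : List Char), l.length ≤ n → pvCollapse l = pvCf l := by
  intro n
  induction n with
  | zero =>
    intro l hl
    have : l = [] := List.length_eq_zero_iff.mp (Nat.le_zero.mp hl)
    subst this
    rw [pvCollapse]
    have h : ¬ (PySem.Chars.find ([] : List Char) [' ', ' '] ≠ -1) := by decide
    rw [if_neg h]
    rfl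
  | succ n ih =>
    intro l hl
    rw [pvCollapse]
    by_cases h : PySem.Chars.find l [' ', ' '] ≠ -1
    · rw [if_pos h, pvReplace_eq_rep1]
      have hlt := pvRep1_length_lt l ((PySem.Chars.find_ne_neg_one_iff _ _).mp h)
      rw [ih (pvRep1 l) (by omega), pvCf_rep1]
    · rw [if_neg h]
      push_neg at h
      exact (pvCf_no_dd l ((PySem.Chars.find_eq_neg_one_iff _ _).mp h)).symm

theorem pvCollapse_eq_cf (l : List Char) : pvCollapse l = pvCf l :=
  pvCollapse_eq_cf_aux l.length l le_rfl

-- strip / word lemmas -------------------------------------------------------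

theorem pvRstrip_cons (a : Char) (x : List Char) :
    PySem.Chars.rstrip (a :: x) =
      if (List.dropWhile PySem.Chars.isspace x.reverse).isEmpty then
        (List.dropWhile PySem.Chars.isspace [a]).reverse
      else a :: PySem.Chars.rstrip x := by
  show (List.dropWhile _ (a :: x).reverse).reverse = _
  rw [List.reverse_cons, List.dropWhile_append]
  by_cases he : (List.dropWhile PySem.Chars.isspace x.reverse).isEmpty
  · rw [if_pos he, if_pos he]
  · rw [if_neg he, if_neg he]
    simp [PySem.Chars.rstrip]

theorem pvRstrip_nil_iff (x : List Char) :
    PySem.Chars.rstrip x = [] ↔ (List.dropWhile PySem.Chars.isspace x.reverse).isEmpty := by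
  simp [PySem.Chars.rstrip]

theorem pvRstrip_cons_nonspace (c : Char) (x : List Char) (h : PySem.Chars.isspace c = false) :
    PySem.Chars.rstrip (c :: x) = c :: PySem.Chars.rstrip x := by
  rw [pvRstrip_cons]
  by_cases he : (List.dropWhile PySem.Chars.isspace x.reverse).isEmpty
  · rw [if_pos he]
    have hx : PySem.Chars.rstrip x = [] := (pvRstrip_nil_iff x).mpr he
    simp [List.dropWhile_cons, h, hx]
  · rw [if_neg he]

theorem pvRstrip_cons_space (x : List Char) :
    PySem.Chars.rstrip (' ' :: x) =
      if PySem.Chars.rstrip x = [] then [] else ' ' :: PySem.Chars.rstrip x := by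
  rw [pvRstrip_cons]
  by_cases he : (List.dropWhile PySem.Chars.isspace x.reverse).isEmpty
  · rw [if_pos he, if_pos ((pvRstrip_nil_iff x).mpr he)]
    simp [List.dropWhile_cons]
    decide
  · rw [if_neg he, if_neg (fun hc => he ((pvRstrip_nil_iff x).mp hc))]

-- word = nonempty run of non-space allowed characters
def pvWordOk (w : List Char) : Prop := ∀ c ∈ w, pvPA c = true ∧ c ≠ ' '

theorem pvWord_nonspace {w : List Char} (hw : pvWordOk w) :
    ∀ c ∈ w, PySem.Chars.isspace c = false := by
  intro c hc
  have h2 := (hw c hc).2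
  rcases pvPA_char (hw c hc).1 with h | ⟨h, _⟩
  · exact absurd h h2
  · exact h

theorem pvRstrip_word_append {w : List Char} (x : List Char) (hw : pvWordOk w) :
    PySem.Chars.rstrip (w ++ x) = w ++ PySem.Chars.rstrip x := by
  induction w with
  | nil => simp
  | cons c w' ih =>
    have hc := pvWord_nonspace hw c (by simp)
    rw [List.cons_append, pvRstrip_cons_nonspace c _ hc,
      ih (fun d hd => hw d (by simp [hd]))]
    rfl

theorem pvLstrip_cons_nonspace (c : Char) (x : List Char) (h : PySem.Chars.isspace c = false) :
    PySem.Chars.lstrip (c :: x) = c :: x := by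
  simp [PySem.Chars.lstrip, List.dropWhile_cons, h]

theorem pvLstrip_cons_space (x : List Char) :
    PySem.Chars.lstrip (' ' :: x) = PySem.Chars.lstrip x := by
  have hs : PySem.Chars.isspace ' ' = true := by decide
  simp [PySem.Chars.lstrip, List.dropWhile_cons, hs]

theorem pvStrip_eq (x : List Char) :
    PySem.Chars.strip x = PySem.Chars.rstrip (PySem.Chars.lstrip x) := rfl

theorem pvCf_cons_nonspace (c : Char) (x : List Char) (h : c ≠ ' ') :
    pvCf (c :: x) = c :: pvCf x := by
  match x with
  | [] => rfl
  | b :: t => simp [pvCf, h]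

theorem pvCf_word_append {w : List Char} (x : List Char) (hw : pvWordOk w) :
    pvCf (w ++ x) = w ++ pvCf x := by
  induction w with
  | nil => simp
  | cons c w' ih =>
    rw [List.cons_append, pvCf_cons_nonspace c _ (hw c (by simp)).2,
      ih (fun d hd => hw d (by simp [hd]))]
    rfl

theorem pvToks_word_append {w : List Char} (r : List Char) (hw : pvWordOk w) :
    ∀ cur, pvToks (w ++ r) cur = pvToks r (cur ++ w) := by
  induction w with
  | nil => intro cur; simp
  | cons c w' ih =>
    intro cur
    have hc : c ∈ pvAllowed := by
      have h2 := (hw c (by simp)).2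
      rcases pvPA_char (hw c (by simp)).1 with h | ⟨_, h3⟩
      · exact absurd h h2
      · simpa using h3
    rw [List.cons_append]
    rw [show pvToks (c :: (w' ++ r)) cur = pvToks (w' ++ r) (cur ++ [c]) by simp [pvToks, hc]]
    rw [ih (fun d hd => hw d (by simp [hd]))]
    simp

theorem pvJoin_cons (x : List Char) (xs : List (List Char)) :
    PySem.Chars.join [' '] (x :: xs) =
      x ++ (if xs = [] then [] else ' ' :: PySem.Chars.join [' '] xs) := by
  match xs with
  | [] => simp [PySem.Chars.join, List.intercalate]
  | y :: ys => simp [PySem.Chars.join, List.intercalate, List.intersperse]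

-- decomposition of a good list starting with a non-space char
theorem pvDropWhile_shape (p : Char → Bool) (t : List Char) :
    t.dropWhile p = [] ∨ ∃ c u, t.dropWhile p = c :: u ∧ p c = false := by
  induction t with
  | nil => exact Or.inl rfl
  | cons c t ih =>
    by_cases hc : p c
    · simpa [List.dropWhile_cons, hc] using ih
    · exact Or.inr ⟨c, t, by simp [List.dropWhile_cons, hc], by simpa using hc⟩

def pvGood (m : List Char) : Prop := ∀ c ∈ m, pvPA c = true

-- the two main inductions ---------------------------------------------------

def pvNS (c : Char) : Bool := !(c == ' ')

theorem pvWordOk_decomp {b : Char} {u : List Char} (hb : b ≠ ' ')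
    (hg : pvGood (b :: u)) : pvWordOk (b :: u.takeWhile pvNS) := by
  intro c hc
  rcases List.mem_cons.mp hc with rfl | hc
  · exact ⟨hg c (by simp), hb⟩
  · refine ⟨hg c (List.mem_cons_of_mem b ((u.takeWhile_sublist pvNS).subset hc)), ?_⟩
    have := List.mem_takeWhile_imp hc
    simpa [pvNS] using this

theorem pvGood_drop {b : Char} {u : List Char} (hg : pvGood (b :: u)) :
    pvGood (u.dropWhile pvNS) := by
  intro c hc
  exact hg c (List.mem_cons_of_mem b ((u.dropWhile_sublist pvNS).subset hc))

theorem pvGood_tail {b : Char} {u : List Char} (hg : pvGood (b :: u)) : pvGood u :=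
  fun c hc => hg c (List.mem_cons_of_mem b hc)

theorem pvToks_space (u : List Char) (w : List Char) :
    pvToks (' ' :: u) w = if w = [] then pvToks u [] else w :: pvToks u [] := by
  have hsp : ' ' ∉ pvAllowed := by decide
  by_cases hw : w = [] <;> simp [pvToks, hsp, hw]

theorem pvQ : ∀ (n : Nat) (r : List Char), r.length ≤ n → pvGood r →
    PySem.Chars.rstrip (pvCf (' ' :: r)) =
      (if pvToks r [] = [] then [] else ' ' :: PySem.Chars.join [' '] (pvToks r [])) := by
  intro n
  induction n with
  | zero =>
    intro r hr _
    have : r = [] := List.length_eq_zero_iff.mp (Nat.le_zero.mp hr)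
    subst this
    decide
  | succ n ih =>
    intro r hr hg
    match r with
    | [] => decide
    | b :: u =>
      by_cases hb : b = ' '
      · subst hb
        rw [show pvCf (' ' :: ' ' :: u) = pvCf (' ' :: u) by simp [pvCf]]
        rw [show pvToks (' ' :: u) [] = pvToks u [] by simp [pvToks_space]]
        exact ih u (by simp at hr; omega) (pvGood_tail hg)
      · -- decompose into the leading word w and the rest r2
        set w : List Char := b :: u.takeWhile pvNS with hw
        set r2 : List Char := u.dropWhile pvNS with hr2
        have hwu : b :: u = w ++ r2 := by
          simp [hw, hr2, List.takeWhile_append_dropWhile]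
        have hwOk : pvWordOk w := pvWordOk_decomp hb hg
        have hg2 : pvGood r2 := pvGood_drop hg
        have hlen2 : r2.length ≤ u.length := List.Sublist.length_le (u.dropWhile_sublist pvNS)
        have hcfcons : pvCf (' ' :: b :: u) = ' ' :: pvCf (b :: u) := by
          simp [pvCf, hb]
        rw [hcfcons, hwu, pvCf_word_append _ hwOk]
        rw [pvRstrip_cons_space, pvRstrip_word_append _ hwOk]
        rw [if_neg (by simp [hw])]
        rw [pvToks_word_append _ hwOk, List.nil_append]
        have hwne : w ≠ [] := by simp [hw]
        rcases pvDropWhile_shape pvNS u with hsh | ⟨c, u2, hsh, hc⟩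
        · rw [← hr2] at hsh
          rw [hsh]
          rw [show pvToks ([] : List Char) w = [w] by simp [pvToks, hwne]]
          rw [if_neg (List.cons_ne_nil w [])]
          rw [show pvCf [] = [] from rfl, show PySem.Chars.rstrip [] = [] from rfl]
          simp [PySem.Chars.join, List.intercalate]
        · rw [← hr2] at hsh
          have hcsp : c = ' ' := by simpa [pvNS] using hc
          subst hcsp
          rw [hsh]
          have hu2 : u2.length ≤ n := by
            have h1 : r2.length ≤ u.length := List.Sublist.length_le (u.dropWhile_sublist pvNS)
            have h2 : r2.length = u2.length + 1 := by rw [hsh]; rfl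
            simp at hr; omega
          have hg3 : pvGood u2 := by
            rw [hsh] at hg2
            exact pvGood_tail hg2
          rw [ih u2 hu2 hg3]
          have hts : pvToks (' ' :: u2) w = w :: pvToks u2 [] := by
            rw [pvToks_space, if_neg hwne]
          rw [hts, if_neg (List.cons_ne_nil w _), pvJoin_cons]

theorem pvP : ∀ (n : Nat) (m : List Char), m.length ≤ n → pvGood m →
    PySem.Chars.strip (pvCf m) = PySem.Chars.join [' '] (pvToks m []) := by
  intro n
  induction n with
  | zero =>
    intro m hm _
    have : m = [] := List.length_eq_zero_iff.mp (Nat.le_zero.mp hm)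
    subst this
    decide
  | succ n ih =>
    intro m hm hg
    match m with
    | [] => decide
    | b :: u =>
      by_cases hb : b = ' '
      · subst hb
        rw [show pvToks (' ' :: u) [] = pvToks u [] by simp [pvToks_space]]
        rw [← ih u (by simp at hm; omega) (pvGood_tail hg)]
        -- strip (pvCf (' ' :: u)) = strip (pvCf u)
        match u with
        | [] => decide
        | c :: u2 =>
          by_cases hc : c = ' '
          · subst hc
            rw [show pvCf (' ' :: ' ' :: u2) = pvCf (' ' :: u2) by simp [pvCf]]
          · rw [show pvCf (' ' :: c :: u2) = ' ' :: pvCf (c :: u2) by simp [pvCf, hc]]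
            rw [pvStrip_eq, pvStrip_eq, pvLstrip_cons_space]
      · set w : List Char := b :: u.takeWhile pvNS with hw
        set r2 : List Char := u.dropWhile pvNS with hr2
        have hwu : b :: u = w ++ r2 := by
          simp [hw, hr2, List.takeWhile_append_dropWhile]
        have hwOk : pvWordOk w := pvWordOk_decomp hb hg
        have hg2 : pvGood r2 := pvGood_drop hg
        have hbns : PySem.Chars.isspace b = false :=
          pvWord_nonspace hwOk b (by rw [hw]; exact List.mem_cons_self ..)
        rw [hwu, pvCf_word_append _ hwOk]
        rw [pvStrip_eq]
        rw [hw, List.cons_append, pvLstrip_cons_nonspace _ _ hbns, ← List.cons_append, ← hw]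
        rw [pvRstrip_word_append _ hwOk]
        rw [pvToks_word_append _ hwOk, List.nil_append]
        have hwne : w ≠ [] := by simp [hw]
        rcases pvDropWhile_shape pvNS u with hsh | ⟨c, u2, hsh, hc⟩
        · rw [← hr2] at hsh
          rw [hsh]
          rw [show pvToks ([] : List Char) w = [w] by simp [pvToks, hwne]]
          rw [show pvCf [] = [] from rfl, show PySem.Chars.rstrip [] = [] from rfl]
          simp [PySem.Chars.join, List.intercalate]
        · rw [← hr2] at hsh
          have hcsp : c = ' ' := by simpa [pvNS] using hc
          subst hcsp
          rw [hsh]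
          have hu2 : u2.length ≤ n := by
            have h1 : r2.length ≤ u.length := List.Sublist.length_le (u.dropWhile_sublist pvNS)
            have h2 : r2.length = u2.length + 1 := by rw [hsh]; rfl
            simp at hm; omega
          have hg3 : pvGood u2 := by
            rw [hsh] at hg2
            exact pvGood_tail hg2
          rw [pvQ n u2 hu2 hg3]
          have hts : pvToks (' ' :: u2) w = w :: pvToks u2 [] := by
            rw [pvToks_space, if_neg hwne]
          rw [hts, pvJoin_cons]

-- ===== VERDICT (by name: the statement is the Claim_ definition above) =====
theorem leave_numbers_spec : Claim_equal_leave_numbers := by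
  intro s _
  unfold Spec_leave_numbers leave_numbers leave_numbers_alt
  simp only
  rw [show (fun (result : List Char) k => if pvNumbers.contains k || k == '.' then result ++ [k] else result)
        = (fun acc x => if pvPA x = true then acc ++ [id x] else acc) from by
      funext acc x; simp [pvPA]]
  rw [PySem.List.foldl_append_if pvPA id s.toList []]
  simp only [List.nil_append, List.map_id]
  rw [pvCollapse_eq_cf]
  rw [pvTokB_toks, List.nil_append]
  rw [← pvToks_filter]
  rw [pvP (s.toList.filter pvPA).length _ le_rfl (pvGood_filter s.toList)]
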